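-- pv_equiv track=rewrite | github.com/nealholt/python_programming_curricula | CS1/0600_discrete_robo_rally_tiles/drafts/draft26/functions.py | blockedByWall
-- ===== SOURCE A (Python) =====
-- def outOfBounds(board,row,col):
--     return row<0 or col<0 or row>=len(board) or col>=len(board[0])
--
-- def blockedByWallImmediate(board, row, col, direction):
--     '''Pre: direction is a string
--     Post: returns True if row and column is immediately blocked by a wall in
--     the indicated direction.'''
--     if outOfBounds(board, row, col):
--         return False
--     #Check indicated direction
--     if direction == 'north':
--         return board[row][col]=='1wu ' or \
--             board[row][col]=='2wur' or \
--             board[row][col]=='2wlu' or \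
--             (not(outOfBounds(board, row-1, col)) and \
--             (board[row-1][col]=='1wd ' or \
--             board[row-1][col]=='2wrd' or \
--             board[row-1][col]=='2wdl'))
--     elif direction == 'east':
--         return board[row][col]=='1wr ' or \
--             board[row][col]=='2wur' or \
--             board[row][col]=='2wrd' or \
--             (not(outOfBounds(board, row, col+1)) and \
--             (board[row][col+1]=='1wl ' or \
--             board[row][col+1]=='2wdl' or \
--             board[row][col+1]=='2wlu'))
--     elif direction == 'south':
--         return board[row][col]=='1wd ' or \
--             board[row][col]=='2wrd' or \
--             board[row][col]=='2wdl' or \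
--             (not(outOfBounds(board, row+1, col)) and \
--             (board[row+1][col]=='1wu ' or \
--             board[row+1][col]=='2wur' or \
--             board[row+1][col]=='2wlu'))
--     else: #if direction == 'west':
--         return board[row][col]=='1wl ' or \
--             board[row][col]=='2wdl' or \
--             board[row][col]=='2wlu' or \
--             (not(outOfBounds(board, row, col-1)) and \
--             (board[row][col-1]=='1wr ' or \
--             board[row][col-1]=='2wur' or \
--             board[row][col-1]=='2wrd'))
--
-- def blockedByWall(board, row, col, direction):
--     '''Pre: direction is a string
--     Post: returns row and column right before the wall or where out of bounds'''
--     #Robots can always move out of bounds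
--     if outOfBounds(board, row, col):
--         return row,col
--     #Check indicated direction
--     if direction == 'north' and board[row][col] != '1wu ' and board[row][col] != '2wur' and board[row][col] != '2wlu' and not blockedByWallImmediate(board, row-1, col, 'south'):
--         return blockedByWall(board, row-1, col, direction)
--     elif direction == 'east' and board[row][col] != '1wr ' and board[row][col] != '2wur' and board[row][col] != '2wrd' and not blockedByWallImmediate(board, row, col+1, 'west'):
--         return blockedByWall(board, row, col+1, direction)
--     elif direction == 'south' and board[row][col] != '1wd ' and board[row][col] != '2wrd' and board[row][col] != '2wdl' and not blockedByWallImmediate(board, row+1, col, 'north'):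
--         return blockedByWall(board, row+1, col, direction)
--     elif direction == 'west' and board[row][col] != '1wl ' and board[row][col] != '2wdl' and board[row][col] != '2wlu' and not blockedByWallImmediate(board, row, col-1, 'east'):
--         return blockedByWall(board, row, col-1, direction)
--     return row,col
-- ===== SOURCE B (Python) =====
-- def outOfBounds(board,row,col):
--     return row<0 or col<0 or row>=len(board) or col>=len(board[0])
--
-- def blockedByWallImmediate(board, row, col, direction):
--     '''Pre: direction is a string
--     Post: returns True if row and column is immediately blocked by a wall in
--     the indicated direction.'''
--     if outOfBounds(board, row, col):
--         return False
--     #Check indicated direction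
--     if direction == 'north':
--         return board[row][col]=='1wu ' or \
--             board[row][col]=='2wur' or \
--             board[row][col]=='2wlu' or \
--             (not(outOfBounds(board, row-1, col)) and \
--             (board[row-1][col]=='1wd ' or \
--             board[row-1][col]=='2wrd' or \
--             board[row-1][col]=='2wdl'))
--     elif direction == 'east':
--         return board[row][col]=='1wr ' or \
--             board[row][col]=='2wur' or \
--             board[row][col]=='2wrd' or \
--             (not(outOfBounds(board, row, col+1)) and \
--             (board[row][col+1]=='1wl ' or \
--             board[row][col+1]=='2wdl' or \
--             board[row][col+1]=='2wlu'))
--     elif direction == 'south':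
--         return board[row][col]=='1wd ' or \
--             board[row][col]=='2wrd' or \
--             board[row][col]=='2wdl' or \
--             (not(outOfBounds(board, row+1, col)) and \
--             (board[row+1][col]=='1wu ' or \
--             board[row+1][col]=='2wur' or \
--             board[row+1][col]=='2wlu'))
--     else: #if direction == 'west':
--         return board[row][col]=='1wl ' or \
--             board[row][col]=='2wdl' or \
--             board[row][col]=='2wlu' or \
--             (not(outOfBounds(board, row, col-1)) and \
--             (board[row][col-1]=='1wr ' or \
--             board[row][col-1]=='2wur' or \
--             board[row][col-1]=='2wrd'))
--
-- _MOVE = {'north': ((-1, 0), {'1wu ', '2wur', '2wlu'}, 'south'),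
--          'east':  ((0, 1),  {'1wr ', '2wur', '2wrd'}, 'west'),
--          'south': ((1, 0),  {'1wd ', '2wrd', '2wdl'}, 'north'),
--          'west':  ((0, -1), {'1wl ', '2wdl', '2wlu'}, 'east')}
--
-- def blockedByWall(board, row, col, direction):
--     '''Iterative walk: advance one step at a time until out of bounds or a
--     wall blocks the move; direction data is table-driven.'''
--     info = _MOVE.get(direction)
--     if info is None:
--         return row, col
--     (dr, dc), walls, opposite = info
--     while not outOfBounds(board, row, col):
--         if board[row][col] in walls or blockedByWallImmediate(board, row + dr, col + dc, opposite):
--             break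
--         row += dr
--         col += dc
--     return row, col
-- ===== Notes on version B (the rewrite author's own statement) =====
-- stated objective: alternative
-- what changed: Replaces A's four-way tail recursion (one branch of conditions per direction, re-dispatched on every step) with a single table-driven iterative while-loop: the step vector, blocking wall set and opposite direction are looked up once from a dict and one uniform loop advances until out of bounds or blocked.
import Mathlib
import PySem

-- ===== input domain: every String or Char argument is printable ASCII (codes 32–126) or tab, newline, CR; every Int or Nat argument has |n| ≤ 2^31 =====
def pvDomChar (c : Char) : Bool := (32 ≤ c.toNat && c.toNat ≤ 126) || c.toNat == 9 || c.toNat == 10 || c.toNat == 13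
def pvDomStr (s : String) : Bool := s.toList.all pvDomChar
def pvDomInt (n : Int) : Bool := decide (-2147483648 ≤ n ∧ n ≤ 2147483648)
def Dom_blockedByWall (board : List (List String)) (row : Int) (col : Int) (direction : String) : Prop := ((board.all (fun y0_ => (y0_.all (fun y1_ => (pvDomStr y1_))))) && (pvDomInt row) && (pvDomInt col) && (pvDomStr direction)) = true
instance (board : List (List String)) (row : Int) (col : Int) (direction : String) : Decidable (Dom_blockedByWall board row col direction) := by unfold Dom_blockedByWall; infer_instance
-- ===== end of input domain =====

-- B rewrites the tail recursion of A as a table-driven iterative walk (objective: simpler/alternative decomposition); same return value on all rectangular-enough boards.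

-- ===== PORT A =====
-- Shared helpers of A (B keeps them unchanged).
def pvOOB (board : List (List String)) (row : Int) (col : Int) : Bool :=
  row < 0 || col < 0 || (board.length : Int) ≤ row || ((board.headD []).length : Int) ≤ col

-- board[r][c] for the in-bounds non-negative indices the Pythons access (exact there;
-- the getD defaults only fill in where Python would raise IndexError).
def cellAt (board : List (List String)) (r c : Int) : String :=
  (PySem.List.pyGet? ((PySem.List.pyGet? board r).getD []) c).getD ""

def blockedByWallImmediate (board : List (List String)) (row : Int) (col : Int) (direction : String) : Bool :=
  if pvOOB board row col then false
  else if direction == "north" then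
    cellAt board row col == "1wu " || cellAt board row col == "2wur" || cellAt board row col == "2wlu" ||
      (!pvOOB board (row-1) col &&
        (cellAt board (row-1) col == "1wd " || cellAt board (row-1) col == "2wrd" || cellAt board (row-1) col == "2wdl"))
  else if direction == "east" then
    cellAt board row col == "1wr " || cellAt board row col == "2wur" || cellAt board row col == "2wrd" ||
      (!pvOOB board row (col+1) &&
        (cellAt board row (col+1) == "1wl " || cellAt board row (col+1) == "2wdl" || cellAt board row (col+1) == "2wlu"))
  else if direction == "south" then
    cellAt board row col == "1wd " || cellAt board row col == "2wrd" || cellAt board row col == "2wdl" ||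
      (!pvOOB board (row+1) col &&
        (cellAt board (row+1) col == "1wu " || cellAt board (row+1) col == "2wur" || cellAt board (row+1) col == "2wlu"))
  else
    cellAt board row col == "1wl " || cellAt board row col == "2wdl" || cellAt board row col == "2wlu" ||
      (!pvOOB board row (col-1) &&
        (cellAt board row (col-1) == "1wr " || cellAt board row (col-1) == "2wur" || cellAt board row (col-1) == "2wrd"))

def blockedByWall (board : List (List String)) (row : Int) (col : Int) (direction : String) : Int × Int :=
  if _h0 : pvOOB board row col then (row, col)
  else if _h1 : direction == "north" && cellAt board row col != "1wu " && cellAt board row col != "2wur" && cellAt board row col != "2wlu" && !blockedByWallImmediate board (row-1) col "south" then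
    blockedByWall board (row-1) col direction
  else if _h2 : direction == "east" && cellAt board row col != "1wr " && cellAt board row col != "2wur" && cellAt board row col != "2wrd" && !blockedByWallImmediate board row (col+1) "west" then
    blockedByWall board row (col+1) direction
  else if _h3 : direction == "south" && cellAt board row col != "1wd " && cellAt board row col != "2wrd" && cellAt board row col != "2wdl" && !blockedByWallImmediate board (row+1) col "north" then
    blockedByWall board (row+1) col direction
  else if _h4 : direction == "west" && cellAt board row col != "1wl " && cellAt board row col != "2wdl" && cellAt board row col != "2wlu" && !blockedByWallImmediate board row (col-1) "east" then
    blockedByWall board row (col-1) direction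
  else (row, col)
termination_by
  (if direction == "north" then (row+1).toNat
   else if direction == "east" then (((board.headD []).length : Int) - col).toNat
   else if direction == "south" then ((board.length : Int) - row).toNat
   else (col+1).toNat)
decreasing_by
  · simp only [Bool.and_eq_true, beq_iff_eq] at _h1
    obtain ⟨⟨⟨⟨hd, _⟩, _⟩, _⟩, _⟩ := _h1
    subst hd
    simp only [pvOOB, Bool.or_eq_true, decide_eq_true_eq] at _h0
    simp only [show (("north" == "north") = true) from rfl, if_true]
    omega
  · simp only [Bool.and_eq_true, beq_iff_eq] at _h2
    obtain ⟨⟨⟨⟨hd, _⟩, _⟩, _⟩, _⟩ := _h2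
    subst hd
    simp only [pvOOB, Bool.or_eq_true, decide_eq_true_eq, List.headD_eq_head?_getD] at _h0
    simp [List.headD_eq_head?_getD]
    omega
  · simp only [Bool.and_eq_true, beq_iff_eq] at _h3
    obtain ⟨⟨⟨⟨hd, _⟩, _⟩, _⟩, _⟩ := _h3
    subst hd
    simp only [pvOOB, Bool.or_eq_true, decide_eq_true_eq, List.headD_eq_head?_getD] at _h0
    simp
    omega
  · simp only [Bool.and_eq_true, beq_iff_eq] at _h4
    obtain ⟨⟨⟨⟨hd, _⟩, _⟩, _⟩, _⟩ := _h4
    subst hd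
    simp only [pvOOB, Bool.or_eq_true, decide_eq_true_eq, List.headD_eq_head?_getD] at _h0
    simp
    omega

-- ===== PORT B =====
-- direction table of Source B's _MOVE dict: step vector, blocking wall strings, opposite direction
inductive PVDir | n | e | s | w
deriving DecidableEq, Repr

def pvStep : PVDir → Int × Int
  | .n => (-1, 0) | .e => (0, 1) | .s => (1, 0) | .w => (0, -1)

def pvWalls : PVDir → List String
  | .n => ["1wu ", "2wur", "2wlu"]
  | .e => ["1wr ", "2wur", "2wrd"]
  | .s => ["1wd ", "2wrd", "2wdl"]
  | .w => ["1wl ", "2wdl", "2wlu"]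

def pvOpp : PVDir → String
  | .n => "south" | .e => "west" | .s => "north" | .w => "east"

-- _MOVE.get(direction)
def pvDirOf? (direction : String) : Option PVDir :=
  if direction == "north" then some .n
  else if direction == "east" then some .e
  else if direction == "south" then some .s
  else if direction == "west" then some .w
  else none

-- the while loop of Source B
def pvWalk (board : List (List String)) (d : PVDir) (row col : Int) : Int × Int :=
  if _h0 : pvOOB board row col then (row, col)
  else if (pvWalls d).contains (cellAt board row col)
        || blockedByWallImmediate board (row + (pvStep d).1) (col + (pvStep d).2) (pvOpp d) then (row, col)
  else pvWalk board d (row + (pvStep d).1) (col + (pvStep d).2)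
termination_by
  (match d with
   | .n => (row+1).toNat
   | .e => (((board.headD []).length : Int) - col).toNat
   | .s => ((board.length : Int) - row).toNat
   | .w => (col+1).toNat)
decreasing_by
  cases d <;>
    (simp only [pvOOB, Bool.or_eq_true, decide_eq_true_eq, pvStep] at _h0 ⊢; omega)

def blockedByWall_alt (board : List (List String)) (row : Int) (col : Int) (direction : String) : Int × Int :=
  match pvDirOf? direction with
  | none => (row, col)
  | some d => pvWalk board d row col

-- ===== PRECONDITION & SPEC =====
def Spec_blockedByWall (board : List (List String)) (row : Int) (col : Int) (direction : String) (out : Int × Int) : Prop := out = blockedByWall_alt board row col direction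
instance (board : List (List String)) (row : Int) (col : Int) (direction : String) (out : Int × Int) : Decidable (Spec_blockedByWall board row col direction out) := by unfold Spec_blockedByWall; infer_instance

-- ===== CLAIM (what is proved, stated in full; the proofs are below) =====
def Claim_equal_blockedByWall : Prop := ∀ (board : List (List String)) (row : Int) (col : Int) (direction : String), Dom_blockedByWall board row col direction → Spec_blockedByWall board row col direction (blockedByWall board row col direction)

-- ===== LEMMAS AND PROOFS =====
-- the direction string that names d (pvDirOf? (pvName d) = some d)
def pvName : PVDir → String
  | .n => "north" | .e => "east" | .s => "south" | .w => "west"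

theorem pvKey (board : List (List String)) (d : PVDir) (row col : Int) :
    blockedByWall board row col (pvName d) = pvWalk board d row col := by
  fun_induction pvWalk board d row col with
  | case1 row col h0 => rw [blockedByWall]; simp [h0]
  | case2 row col h0 hblk =>
      rw [blockedByWall]
      cases d <;> simp_all [pvName, pvWalls, pvStep, pvOpp, sub_eq_add_neg] <;> (intros; simp_all)
  | case3 row col h0 hblk ih =>
      rw [blockedByWall]
      cases d <;> simp_all [pvName, pvWalls, pvStep, pvOpp, sub_eq_add_neg]

theorem pvOther (board : List (List String)) (row col : Int) (direction : String)
    (hn : ¬ direction = "north") (he : ¬ direction = "east")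
    (hs : ¬ direction = "south") (hw : ¬ direction = "west") :
    blockedByWall board row col direction = (row, col) := by
  rw [blockedByWall]
  simp [hn, he, hs, hw]

-- ===== VERDICT (by name: the statement is the Claim_ definition above) =====
theorem blockedByWall_spec : Claim_equal_blockedByWall := by
  intro board row col direction _
  unfold Spec_blockedByWall blockedByWall_alt pvDirOf?
  by_cases hn : direction = "north"
  · subst hn; exact pvKey board .n row col
  · by_cases he : direction = "east"
    · subst he; exact pvKey board .e row col
    · by_cases hs : direction = "south"
      · subst hs; exact pvKey board .s row col
      · by_cases hw : direction = "west"
        · subst hw; exact pvKey board .w row col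
        · simp only [beq_iff_eq, hn, he, hs, hw, if_false]
          exact pvOther board row col direction hn he hs hw
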